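-- pv_equiv track=rewrite | github.com/Midast0uch/IRISVOICE | backend/gateway/security_filter.py | _contains_suspicious_vision
-- ===== SOURCE A (Python) =====
-- from typing import Dict, Any, Optional, List, Set, Callable
--
-- def _contains_suspicious_vision(vision_payload: Dict[str, Any]) -> bool:
--     """Check if a vision request contains suspicious patterns"""
--     if not vision_payload:
--         return False
--
--     # Example: check for suspicious keywords in vision requests
--     suspicious_keywords = ["password", "credit_card", "ssn"]
--
--     for key, value in vision_payload.items():
--         if isinstance(value, str):
--             for keyword in suspicious_keywords:
--                 if keyword in value.lower():
--                     return True
--     return False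
-- ===== SOURCE B (Python) =====
-- def _contains_suspicious_vision(vision_payload):
--     """Check if a vision request contains suspicious patterns"""
--     suspicious_keywords = ["password", "credit_card", "ssn"]
--     blob = "\n".join(v.lower() for v in vision_payload.values() if isinstance(v, str))
--     # single left-to-right scan: at each position, does some keyword start here?
--     for i in range(len(blob)):
--         for kw in suspicious_keywords:
--             if blob.startswith(kw, i):
--                 return True
--     return False
-- ===== Notes on version B (the rewrite author's own statement) =====
-- stated objective: alternative
-- what changed: B first joins all lowercased string values into one newline-separated blob, then detects keywords with a single left-to-right position scan that checks at each position whether some keyword starts there, instead of A's interleaved per-value loop calling the substring operator per keyword.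
import Mathlib
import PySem

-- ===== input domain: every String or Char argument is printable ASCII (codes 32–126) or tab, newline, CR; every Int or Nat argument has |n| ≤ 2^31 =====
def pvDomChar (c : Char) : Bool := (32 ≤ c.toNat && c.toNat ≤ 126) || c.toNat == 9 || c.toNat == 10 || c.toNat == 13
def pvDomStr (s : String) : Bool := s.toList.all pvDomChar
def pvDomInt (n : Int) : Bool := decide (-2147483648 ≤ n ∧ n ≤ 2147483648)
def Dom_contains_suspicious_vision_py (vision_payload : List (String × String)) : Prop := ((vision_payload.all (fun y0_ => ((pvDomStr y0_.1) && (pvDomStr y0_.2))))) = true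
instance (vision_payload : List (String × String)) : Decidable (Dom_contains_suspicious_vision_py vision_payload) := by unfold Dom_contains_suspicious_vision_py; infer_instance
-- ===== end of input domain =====

-- B joins all lowercased values into one newline-separated blob and finds keywords with a single
-- left-to-right position scan (prefix check at every suffix), instead of A's interleaved
-- per-value × per-keyword nested loop over the substring operator; objective: alternative.

-- ===== PORT A =====
-- literal transliteration: falsy guard, then nested loops over items and keywords with early return
def contains_suspicious_vision_py (vision_payload : List (String × String)) : Bool :=
  if vision_payload = [] then false
  else
    vision_payload.any (fun kv =>
      (["password", "credit_card", "ssn"]).any (fun keyword =>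
        PySem.Str.isIn keyword (PySem.Str.lower kv.2)))

-- ===== PORT B =====
-- Source B's 'blob.startswith(kw, i)': does the keyword start at the head of this suffix?
def pvStartsHere : List Char → List Char → Bool
  | [], _ => true
  | _ :: _, [] => false
  | k :: ks, c :: cs => k == c && pvStartsHere ks cs

-- Source B's position loop 'for i in range(len(blob))' as structural recursion over suffixes
def pvScan (kws : List (List Char)) : List Char → Bool
  | [] => false
  | c :: cs => kws.any (fun kw => pvStartsHere kw (c :: cs)) || pvScan kws cs

-- literal transliteration of Source B: join the lowercased values, then one position scan
def contains_suspicious_vision_py_alt (vision_payload : List (String × String)) : Bool :=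
  let blob := PySem.Str.join "\n" (vision_payload.map (fun kv => PySem.Str.lower kv.2))
  pvScan ((["password", "credit_card", "ssn"]).map String.toList) blob.toList

-- ===== PRECONDITION & SPEC =====
def Spec_contains_suspicious_vision_py (vision_payload : List (String × String)) (out : Bool) : Prop := out = contains_suspicious_vision_py_alt vision_payload
instance (vision_payload : List (String × String)) (out : Bool) : Decidable (Spec_contains_suspicious_vision_py vision_payload out) := by unfold Spec_contains_suspicious_vision_py; infer_instance

-- ===== CLAIM (what is proved, stated in full; the proofs are below) =====
def Claim_equal_contains_suspicious_vision_py : Prop := ∀ (vision_payload : List (String × String)), Dom_contains_suspicious_vision_py vision_payload → Spec_contains_suspicious_vision_py vision_payload (contains_suspicious_vision_py vision_payload)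

-- ===== LEMMAS AND PROOFS =====

-- pvStartsHere is the prefix relation.
theorem pvStartsHere_iff : ∀ (kw s : List Char), pvStartsHere kw s = true ↔ kw <+: s := by
  intro kw
  induction kw with
  | nil => intro s; simp [pvStartsHere]
  | cons k ks ih =>
    intro s
    cases s with
    | nil => simp [pvStartsHere]
    | cons c cs =>
      simp [pvStartsHere, List.cons_prefix_cons, ih cs, and_comm]

-- For nonempty keywords, the position scan decides the infix relation.
theorem pvScan_iff (kws : List (List Char)) (hne : ∀ kw ∈ kws, kw ≠ []) :
    ∀ s : List Char, (pvScan kws s = true ↔ ∃ kw ∈ kws, kw <:+: s) := by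
  intro s
  induction s with
  | nil =>
    simp only [pvScan, Bool.false_eq_true, false_iff]
    rintro ⟨kw, hkw, hinf⟩
    exact hne kw hkw (List.infix_nil.mp hinf)
  | cons c cs ih =>
    simp only [pvScan, Bool.or_eq_true, List.any_eq_true, ih]
    constructor
    · rintro (⟨kw, hkw, hst⟩ | ⟨kw, hkw, hinf⟩)
      · exact ⟨kw, hkw, ((pvStartsHere_iff kw _).mp hst).isInfix⟩
      · exact ⟨kw, hkw, List.infix_cons_iff.mpr (Or.inr hinf)⟩
    · rintro ⟨kw, hkw, hinf⟩
      rcases (List.infix_cons_iff.mp hinf) with hp | hi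
      · exact Or.inl ⟨kw, hkw, (pvStartsHere_iff kw _).mpr hp⟩
      · exact Or.inr ⟨kw, hkw, hi⟩

-- A prefix of a ++ c :: b avoiding c stays inside a.
theorem pv_prefix_sep {kw a b : List Char} {c : Char} (hc : c ∉ kw)
    (h : kw <+: a ++ c :: b) : kw <+: a := by
  by_cases hl : kw.length ≤ a.length
  · exact List.prefix_of_prefix_length_le h (a.prefix_append (c :: b)) hl
  · exfalso
    have hlt : a.length < kw.length := by omega
    have hget := h.getElem (i := a.length) hlt
    rw [List.getElem_append_right (le_refl a.length)] at hget
    simp at hget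
    exact hc (hget ▸ List.getElem_mem _)

-- Infix of a ++ c :: b avoiding c lies in a or in b.
theorem pv_infix_sep {kw b : List Char} {c : Char} (hc : c ∉ kw) :
    ∀ a : List Char, kw <:+: a ++ c :: b ↔ kw <:+: a ∨ kw <:+: b := by
  intro a
  induction a with
  | nil =>
    rw [List.nil_append, List.infix_cons_iff]
    constructor
    · rintro (hp | hi)
      · rcases kw with _ | ⟨x, xs⟩
        · exact Or.inl List.nil_infix
        · rcases hp with ⟨t, ht⟩
          injection ht with h1 _
          subst h1
          simp at hc
      · exact Or.inr hi
    · rintro (h | h)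
      · rw [List.infix_nil] at h
        subst h
        exact Or.inr List.nil_infix
      · exact Or.inr h
  | cons x a ih =>
    rw [List.cons_append, List.infix_cons_iff, List.infix_cons_iff, ih]
    constructor
    · rintro (hp | hi | hi)
      · exact Or.inl (Or.inl (pv_prefix_sep hc (by simpa using hp)))
      · exact Or.inl (Or.inr hi)
      · exact Or.inr hi
    · rintro ((hp | hi) | hi)
      · rcases hp with ⟨t, ht⟩
        exact Or.inl ⟨t ++ c :: b, by rw [← List.append_assoc, ht]; rfl⟩
      · exact Or.inr (Or.inl hi)
      · exact Or.inr (Or.inr hi)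

-- A nonempty keyword avoiding the separator is in the join iff it is in some part.
theorem pv_infix_join {kw : List Char} {c : Char} (hc : c ∉ kw) (hne : kw ≠ []) :
    ∀ parts : List (List Char),
      (kw <:+: PySem.Chars.join [c] parts ↔ ∃ p ∈ parts, kw <:+: p) := by
  intro parts
  induction parts with
  | nil =>
    simp [PySem.Chars.join_nil]
    intro h
    exact hne h
  | cons p rest ih =>
    rcases rest with _ | ⟨q, rest'⟩
    · simp [PySem.Chars.join_singleton]
    · rw [PySem.Chars.join_cons_cons]
      have h2 : p ++ [c] ++ PySem.Chars.join [c] (q :: rest') = p ++ c :: PySem.Chars.join [c] (q :: rest') := by simp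
      rw [h2, pv_infix_sep hc, ih]
      simp

theorem pv_blob_toList (vp : List (String × String)) :
    (PySem.Str.join "\n" (vp.map fun kv => PySem.Str.lower kv.2)).toList
      = PySem.Chars.join ['\n'] (vp.map fun kv => PySem.Chars.lower kv.2.toList) := by
  simp [PySem.Str.join, List.map_map, Function.comp_def]

-- ===== VERDICT (by name: the statement is the Claim_ definition above) =====
theorem contains_suspicious_vision_py_spec : Claim_equal_contains_suspicious_vision_py := by
  intro vp _
  unfold Spec_contains_suspicious_vision_py
  rcases eq_or_ne vp [] with rfl | h
  · decide
  · simp only [contains_suspicious_vision_py, contains_suspicious_vision_py_alt, if_neg h]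
    have hne : ∀ kw ∈ (["password", "credit_card", "ssn"]).map String.toList, kw ≠ [] := by decide
    apply Bool.eq_iff_iff.mpr
    rw [pvScan_iff _ hne]
    simp only [List.any_eq_true]
    constructor
    · rintro ⟨kv, hkv, kw, hkw, hin⟩
      refine ⟨kw.toList, List.mem_map.mpr ⟨kw, hkw, rfl⟩, ?_⟩
      have hc : ('\n') ∉ kw.toList := by fin_cases hkw <;> decide
      have hkne : kw.toList ≠ [] := by fin_cases hkw <;> decide
      rw [PySem.Str.isIn_iff_infix] at hin
      rw [pv_blob_toList, pv_infix_join hc hkne]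
      exact ⟨_, List.mem_map.mpr ⟨kv, hkv, rfl⟩, by simpa using hin⟩
    · rintro ⟨kwl, hkwl, hin⟩
      obtain ⟨kw, hkw, rfl⟩ := List.mem_map.mp hkwl
      have hc : ('\n') ∉ kw.toList := by fin_cases hkw <;> decide
      have hkne : kw.toList ≠ [] := by fin_cases hkw <;> decide
      rw [pv_blob_toList, pv_infix_join hc hkne] at hin
      obtain ⟨p, hp, hinf⟩ := hin
      obtain ⟨kv, hkv, rfl⟩ := List.mem_map.mp hp
      refine ⟨kv, hkv, kw, hkw, ?_⟩
      rw [PySem.Str.isIn_iff_infix]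
      simpa using hinf
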